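-- pv_equiv track=rewrite | github.com/micmerritt/ai-security-radar | scripts/weekly_report_email.py | _pick_category_label
-- ===== SOURCE A (Python) =====
-- from typing import Any, Dict, List
--
-- CATEGORY_ORDER = [
--     "prompt-injection",
--     "agent-and-tool-security",
--     "rag-and-retrieval-attacks",
--     "poisoning-and-backdoors",
--     "model-extraction-and-privacy",
--     "adversarial-ml",
--     "other",
-- ]
--
-- def _pick_category_label(labels: List[Dict[str, Any]]) -> str:
--     names = [l.get("name", "") for l in labels]
--     names = [n for n in names if n and n not in ("radar", "paper")]
--     if not names:
--         return "other"
--     for c in CATEGORY_ORDER: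
--         if c in names:
--             return c
--     return names[0]
-- ===== SOURCE B (Python) =====
-- from typing import Any, Dict, List
--
-- CATEGORY_ORDER = [
--     "prompt-injection",
--     "agent-and-tool-security",
--     "rag-and-retrieval-attacks",
--     "poisoning-and-backdoors",
--     "model-extraction-and-privacy",
--     "adversarial-ml",
--     "other",
-- ]
--
-- RANK = {c: i for i, c in enumerate(CATEGORY_ORDER)}
--
-- def _pick_category_label(labels: List[Dict[str, Any]]) -> str:
--     names = [l.get("name", "") for l in labels]
--     names = [n for n in names if n and n not in ("radar", "paper")]
--     if not names:
--         return "other"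
--     best = None
--     best_rank = None
--     for n in names:
--         r = RANK.get(n)
--         if r is not None and (best_rank is None or r < best_rank):
--             best, best_rank = n, r
--     return best if best is not None else names[0]
-- ===== Notes on version B (the rewrite author's own statement) =====
-- stated objective: idiomatic
-- what changed: Replaces the scan over CATEGORY_ORDER with membership tests against names by a single pass over names that tracks the name of smallest rank in a precomputed rank table, with names[0] as fallback when nothing is ranked.
import Mathlib
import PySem

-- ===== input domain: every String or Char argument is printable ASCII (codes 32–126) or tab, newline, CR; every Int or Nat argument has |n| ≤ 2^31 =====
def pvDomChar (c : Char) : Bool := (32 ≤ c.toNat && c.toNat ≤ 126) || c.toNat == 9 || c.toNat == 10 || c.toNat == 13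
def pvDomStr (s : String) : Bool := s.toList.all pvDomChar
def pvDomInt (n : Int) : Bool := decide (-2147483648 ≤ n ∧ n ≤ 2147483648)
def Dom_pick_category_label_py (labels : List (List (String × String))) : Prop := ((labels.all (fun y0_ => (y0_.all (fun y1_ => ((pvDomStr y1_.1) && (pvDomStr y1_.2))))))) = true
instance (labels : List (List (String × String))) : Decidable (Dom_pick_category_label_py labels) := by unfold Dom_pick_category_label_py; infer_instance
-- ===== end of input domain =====

-- B replaces A's scan over CATEGORY_ORDER (a `c in names` membership test per category) by a
-- single pass over names tracking the name of smallest rank in a precomputed rank table (idiomatic; same observable behaviour).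

set_option maxHeartbeats 1600000

-- ===== PORT A =====
def CATEGORY_ORDER : List String :=
  ["prompt-injection", "agent-and-tool-security", "rag-and-retrieval-attacks",
   "poisoning-and-backdoors", "model-extraction-and-privacy", "adversarial-ml", "other"]

def pick_category_label_py (labels : List (List (String × String))) : String :=
  let names0 := labels.map (fun l => (PySem.Dict.mk l).getD "name" "")
  let names := names0.filter (fun n => n != "" && n != "radar" && n != "paper")
  match names with
  | [] => "other"
  | n0 :: _ =>
    match CATEGORY_ORDER.find? (fun c => names.contains c) with
    | some c => c
    | none => n0

-- ===== PORT B =====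
-- RANK = {c: i for i, c in enumerate(CATEGORY_ORDER)}
def RANK : PySem.Dict String Int :=
  (PySem.List.enumerate CATEGORY_ORDER).foldl (fun d p => d.insert p.2 p.1) PySem.Dict.empty

def rankStep (st : Option (String × Int)) (n : String) : Option (String × Int) :=
  match RANK.get? n with
  | none => st
  | some r =>
    match st with
    | none => some (n, r)
    | some (b, rb) => if r < rb then some (n, r) else some (b, rb)

def pick_category_label_py_alt (labels : List (List (String × String))) : String :=
  let names0 := labels.map (fun l => (PySem.Dict.mk l).getD "name" "")
  let names := names0.filter (fun n => n != "" && n != "radar" && n != "paper")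
  match names with
  | [] => "other"
  | n0 :: _ =>
    match names.foldl rankStep none with
    | some (b, _) => b
    | none => n0

-- ===== PRECONDITION & SPEC =====
def Spec_pick_category_label_py (labels : List (List (String × String))) (out : String) : Prop := out = pick_category_label_py_alt labels
instance (labels : List (List (String × String))) (out : String) : Decidable (Spec_pick_category_label_py labels out) := by unfold Spec_pick_category_label_py; infer_instance

-- ===== CLAIM (what is proved, stated in full; the proofs are below) =====
def Claim_equal_pick_category_label_py : Prop := ∀ (labels : List (List (String × String))), Dom_pick_category_label_py labels → Spec_pick_category_label_py labels (pick_category_label_py labels)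

-- ===== LEMMAS AND PROOFS =====

/-- The state of B's loop after the whole list `ns`, expressed through A's `find?`. -/
def stateE (ns : List String) : Option (String × Int) :=
  match CATEGORY_ORDER.find? (fun c => ns.contains c) with
  | none => none
  | some c => (RANK.get? c).map (fun r => (c, r))

lemma RANK_eq : RANK = PySem.Dict.mk
    [("prompt-injection", 0), ("agent-and-tool-security", 1), ("rag-and-retrieval-attacks", 2),
     ("poisoning-and-backdoors", 3), ("model-extraction-and-privacy", 4), ("adversarial-ml", 5),
     ("other", 6)] := rfl

lemma step_state (ns : List String) (n : String) :
    rankStep (stateE ns) n = stateE (ns ++ [n]) := by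
  by_cases h0 : n = "prompt-injection"
  · subst h0
    by_cases hb0 : "prompt-injection" ∈ ns <;>
    by_cases hb1 : "agent-and-tool-security" ∈ ns <;>
    by_cases hb2 : "rag-and-retrieval-attacks" ∈ ns <;>
    by_cases hb3 : "poisoning-and-backdoors" ∈ ns <;>
    by_cases hb4 : "model-extraction-and-privacy" ∈ ns <;>
    by_cases hb5 : "adversarial-ml" ∈ ns <;>
    by_cases hb6 : "other" ∈ ns <;> simp_all [rankStep, stateE, CATEGORY_ORDER, RANK_eq, PySem.Dict.get?_mk_cons, PySem.Dict.get?_empty, List.contains_append, List.find?]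
  by_cases h1 : n = "agent-and-tool-security"
  · subst h1
    by_cases hb0 : "prompt-injection" ∈ ns <;>
    by_cases hb1 : "agent-and-tool-security" ∈ ns <;>
    by_cases hb2 : "rag-and-retrieval-attacks" ∈ ns <;>
    by_cases hb3 : "poisoning-and-backdoors" ∈ ns <;>
    by_cases hb4 : "model-extraction-and-privacy" ∈ ns <;>
    by_cases hb5 : "adversarial-ml" ∈ ns <;>
    by_cases hb6 : "other" ∈ ns <;> simp_all [rankStep, stateE, CATEGORY_ORDER, RANK_eq, PySem.Dict.get?_mk_cons, PySem.Dict.get?_empty, List.contains_append, List.find?]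
  by_cases h2 : n = "rag-and-retrieval-attacks"
  · subst h2
    by_cases hb0 : "prompt-injection" ∈ ns <;>
    by_cases hb1 : "agent-and-tool-security" ∈ ns <;>
    by_cases hb2 : "rag-and-retrieval-attacks" ∈ ns <;>
    by_cases hb3 : "poisoning-and-backdoors" ∈ ns <;>
    by_cases hb4 : "model-extraction-and-privacy" ∈ ns <;>
    by_cases hb5 : "adversarial-ml" ∈ ns <;>
    by_cases hb6 : "other" ∈ ns <;> simp_all [rankStep, stateE, CATEGORY_ORDER, RANK_eq, PySem.Dict.get?_mk_cons, PySem.Dict.get?_empty, List.contains_append, List.find?]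
  by_cases h3 : n = "poisoning-and-backdoors"
  · subst h3
    by_cases hb0 : "prompt-injection" ∈ ns <;>
    by_cases hb1 : "agent-and-tool-security" ∈ ns <;>
    by_cases hb2 : "rag-and-retrieval-attacks" ∈ ns <;>
    by_cases hb3 : "poisoning-and-backdoors" ∈ ns <;>
    by_cases hb4 : "model-extraction-and-privacy" ∈ ns <;>
    by_cases hb5 : "adversarial-ml" ∈ ns <;>
    by_cases hb6 : "other" ∈ ns <;> simp_all [rankStep, stateE, CATEGORY_ORDER, RANK_eq, PySem.Dict.get?_mk_cons, PySem.Dict.get?_empty, List.contains_append, List.find?]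
  by_cases h4 : n = "model-extraction-and-privacy"
  · subst h4
    by_cases hb0 : "prompt-injection" ∈ ns <;>
    by_cases hb1 : "agent-and-tool-security" ∈ ns <;>
    by_cases hb2 : "rag-and-retrieval-attacks" ∈ ns <;>
    by_cases hb3 : "poisoning-and-backdoors" ∈ ns <;>
    by_cases hb4 : "model-extraction-and-privacy" ∈ ns <;>
    by_cases hb5 : "adversarial-ml" ∈ ns <;>
    by_cases hb6 : "other" ∈ ns <;> simp_all [rankStep, stateE, CATEGORY_ORDER, RANK_eq, PySem.Dict.get?_mk_cons, PySem.Dict.get?_empty, List.contains_append, List.find?]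
  by_cases h5 : n = "adversarial-ml"
  · subst h5
    by_cases hb0 : "prompt-injection" ∈ ns <;>
    by_cases hb1 : "agent-and-tool-security" ∈ ns <;>
    by_cases hb2 : "rag-and-retrieval-attacks" ∈ ns <;>
    by_cases hb3 : "poisoning-and-backdoors" ∈ ns <;>
    by_cases hb4 : "model-extraction-and-privacy" ∈ ns <;>
    by_cases hb5 : "adversarial-ml" ∈ ns <;>
    by_cases hb6 : "other" ∈ ns <;> simp_all [rankStep, stateE, CATEGORY_ORDER, RANK_eq, PySem.Dict.get?_mk_cons, PySem.Dict.get?_empty, List.contains_append, List.find?]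
  by_cases h6 : n = "other"
  · subst h6
    by_cases hb0 : "prompt-injection" ∈ ns <;>
    by_cases hb1 : "agent-and-tool-security" ∈ ns <;>
    by_cases hb2 : "rag-and-retrieval-attacks" ∈ ns <;>
    by_cases hb3 : "poisoning-and-backdoors" ∈ ns <;>
    by_cases hb4 : "model-extraction-and-privacy" ∈ ns <;>
    by_cases hb5 : "adversarial-ml" ∈ ns <;>
    by_cases hb6 : "other" ∈ ns <;> simp_all [rankStep, stateE, CATEGORY_ORDER, RANK_eq, PySem.Dict.get?_mk_cons, PySem.Dict.get?_empty, List.contains_append, List.find?]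
  · have g0 : ¬("prompt-injection" = n) := fun e => h0 e.symm
    have g1 : ¬("agent-and-tool-security" = n) := fun e => h1 e.symm
    have g2 : ¬("rag-and-retrieval-attacks" = n) := fun e => h2 e.symm
    have g3 : ¬("poisoning-and-backdoors" = n) := fun e => h3 e.symm
    have g4 : ¬("model-extraction-and-privacy" = n) := fun e => h4 e.symm
    have g5 : ¬("adversarial-ml" = n) := fun e => h5 e.symm
    have g6 : ¬("other" = n) := fun e => h6 e.symm
    have hr : RANK.get? n = none := by
      rw [RANK_eq]
      simp only [PySem.Dict.get?_mk_cons, beq_iff_eq, if_neg g0, if_neg g1, if_neg g2, if_neg g3,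
        if_neg g4, if_neg g5, if_neg g6]
      rfl
    by_cases hb0 : "prompt-injection" ∈ ns <;>
    by_cases hb1 : "agent-and-tool-security" ∈ ns <;>
    by_cases hb2 : "rag-and-retrieval-attacks" ∈ ns <;>
    by_cases hb3 : "poisoning-and-backdoors" ∈ ns <;>
    by_cases hb4 : "model-extraction-and-privacy" ∈ ns <;>
    by_cases hb5 : "adversarial-ml" ∈ ns <;>
    by_cases hb6 : "other" ∈ ns <;> simp_all [rankStep, stateE, CATEGORY_ORDER, RANK_eq, PySem.Dict.get?_mk_cons, PySem.Dict.get?_empty, List.contains_append, List.find?]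

lemma fold_eq_state (ns : List String) : ns.foldl rankStep none = stateE ns := by
  induction ns using List.reverseRecOn with
  | nil => decide
  | append_singleton ns n ih => rw [List.foldl_append, List.foldl_cons, List.foldl_nil, ih, step_state]

lemma core_eq (ns : List String) :
    (match ns with
     | [] => "other"
     | n0 :: _ =>
       match CATEGORY_ORDER.find? (fun c => ns.contains c) with
       | some c => c
       | none => n0) =
    (match ns with
     | [] => "other"
     | n0 :: _ =>
       match ns.foldl rankStep none with
       | some (b, _) => b
       | none => n0) := by
  cases ns with
  | nil => rfl
  | cons n0 rest =>
    rw [fold_eq_state]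
    unfold stateE
    cases hf : CATEGORY_ORDER.find? (fun c => (n0 :: rest).contains c) with
    | none => rfl
    | some c =>
      have hc : c ∈ CATEGORY_ORDER := List.mem_of_find?_eq_some hf
      fin_cases hc <;> rfl

-- ===== VERDICT (by name: the statement is the Claim_ definition above) =====
theorem pick_category_label_py_spec : Claim_equal_pick_category_label_py := by
  intro labels _
  unfold Spec_pick_category_label_py pick_category_label_py pick_category_label_py_alt
  exact core_eq _
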